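-- pv_equiv track=rewrite | github.com/vuduc0612/PYTHON-PTIT | PhanTuChot.py | count
-- ===== SOURCE A (Python) =====
-- def count(a, n):
--     st1, st2 = [], []
--     b, c = [0]*n, [0]*n
--     for i in range(n - 1, -1, -1):
--         while len(st1) > 0 and a[i] <= a[st1[-1]]: st1.pop()
--         if len(st1) == 0: b[i] = -1
--         else: b[i] = st1[-1]
--         st1.append(i)
--     for i in range(n):
--         while len(st2)  > 0 and a[i] >= a[st2[-1]]: st2.pop()
--         if len(st2) == 0: c[i] = -1
--         else: c[i] = st2[-1]
--         st2.append(i)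
--     cnt, d = 0, {}
--     for i in range(n):
--         if b[i] == -1 and c[i] == -1 and not a[i] in d:
--             cnt += 1
--             d[a[i]] = 1
--     return cnt
-- ===== SOURCE B (Python) =====
-- def count(a, n):
--     # prefix/suffix scans instead of monotonic stacks: a[i] is a pivot iff
--     # a[i] <= every later element and a[i] >= every earlier one; count distinct pivot values.
--     ok = [False] * n          # ok[i]: a[i] <= all of a[i+1..n-1]
--     run = None                # running min of the elements already seen (to the right)
--     for i in range(n - 1, -1, -1):
--         ok[i] = run is None or a[i] <= run
--         run = a[i] if run is None else min(run, a[i])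
--     piv = set()
--     run = None                # running max of the elements before i
--     for i in range(n):
--         if ok[i] and (run is None or a[i] >= run):
--             piv.add(a[i])
--         run = a[i] if run is None else max(run, a[i])
--     return len(piv)
-- ===== Notes on version B (the rewrite author's own statement) =====
-- stated objective: simpler
-- what changed: Replaces the two monotonic stacks with inner pop-loops, the two index arrays b/c and the first-occurrence dict by two plain running-extremum scans (suffix-min flags, then a forward prefix-max pass) that add pivot values to a set and return its size.
import Mathlib
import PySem

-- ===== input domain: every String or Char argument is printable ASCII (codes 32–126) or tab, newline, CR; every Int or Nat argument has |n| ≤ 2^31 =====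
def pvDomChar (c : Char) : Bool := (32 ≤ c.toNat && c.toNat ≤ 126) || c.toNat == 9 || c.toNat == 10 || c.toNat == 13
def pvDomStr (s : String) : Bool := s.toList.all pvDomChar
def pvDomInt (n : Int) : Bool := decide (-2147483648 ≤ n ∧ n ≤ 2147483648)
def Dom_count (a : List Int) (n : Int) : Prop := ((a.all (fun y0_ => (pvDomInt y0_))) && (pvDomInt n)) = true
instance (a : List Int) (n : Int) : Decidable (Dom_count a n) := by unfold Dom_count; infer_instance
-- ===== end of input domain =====

-- B replaces A's two monotonic stacks, index arrays and first-occurrence dict by two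
-- running-extremum scans feeding a set of pivot values (objective: simpler).

-- ===== PORT A =====
-- body of A's first loop: pop st1 while a[i] <= a[top], record b[i], push i
def stepA1 (a : List Int) (s : List Int × List Int) (i : Int) : List Int × List Int :=
  let st1 := s.1.dropWhile (fun t => decide (PySem.List.pyGetD a i 0 ≤ PySem.List.pyGetD a t 0))
  let bi : Int := st1.headD (-1)
  (i :: st1, PySem.List.pySetD s.2 i bi)

-- body of A's second loop: pop st2 while a[i] >= a[top], record c[i], push i
def stepA2 (a : List Int) (s : List Int × List Int) (i : Int) : List Int × List Int :=
  let st2 := s.1.dropWhile (fun t => decide (PySem.List.pyGetD a t 0 ≤ PySem.List.pyGetD a i 0))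
  let ci : Int := st2.headD (-1)
  (i :: st2, PySem.List.pySetD s.2 i ci)

-- body of A's third loop: count first occurrences of pivot values via dict d
def stepA3 (a b c : List Int) (s : Int × PySem.Dict Int Int) (i : Int) : Int × PySem.Dict Int Int :=
  if PySem.List.pyGetD b i 0 == -1 && PySem.List.pyGetD c i 0 == -1
      && !(s.2.contains (PySem.List.pyGetD a i 0))
  then (s.1 + 1, s.2.insert (PySem.List.pyGetD a i 0) 1)
  else s

def count (a : List Int) (n : Int) : Int :=
  let s1 := (PySem.List.pyRange (n - 1) (-1) (-1)).foldl (stepA1 a) ([], List.replicate n.toNat 0)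
  let b := s1.2
  let s2 := (PySem.List.pyRange 0 n 1).foldl (stepA2 a) ([], List.replicate n.toNat 0)
  let c := s2.2
  let s3 := (PySem.List.pyRange 0 n 1).foldl (stepA3 a b c) (0, PySem.Dict.empty)
  s3.1

-- ===== PORT B =====
-- body of B's backward loop: set ok[i] from the running suffix minimum, update it
def stepB1 (a : List Int) (s : List Bool × Option Int) (i : Int) : List Bool × Option Int :=
  let x := PySem.List.pyGetD a i 0
  let oki : Bool := match s.2 with | none => true | some r => decide (x ≤ r)
  let run : Option Int := match s.2 with | none => some x | some r => some (min r x)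
  (PySem.List.pySetD s.1 i oki, run)

-- body of B's forward loop: add a[i] to the pivot set when ok[i] and a[i] >= running prefix max
def stepB2 (a : List Int) (ok : List Bool) (s : PySem.Set Int × Option Int) (i : Int) :
    PySem.Set Int × Option Int :=
  let x := PySem.List.pyGetD a i 0
  let pass : Bool := PySem.List.pyGetD ok i false
      && (match s.2 with | none => true | some r => decide (r ≤ x))
  let piv := if pass then PySem.Set.add s.1 x else s.1
  let run : Option Int := match s.2 with | none => some x | some r => some (max r x)
  (piv, run)

def count_alt (a : List Int) (n : Int) : Int :=
  let s1 := (PySem.List.pyRange (n - 1) (-1) (-1)).foldl (stepB1 a) (List.replicate n.toNat false, none)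
  let ok := s1.1
  let s2 := (PySem.List.pyRange 0 n 1).foldl (stepB2 a ok) (PySem.Set.empty, none)
  (PySem.Set.len s2.1 : Int)

-- ===== PRECONDITION & SPEC =====
-- A indexes a[i] for every i in range(n): n > len(a) raises IndexError; any n ≤ len(a)
-- (including negative n, on which both loops are empty) returns normally.
def Pre_count (a : List Int) (n : Int) : Prop := n ≤ (a.length : Int)
instance (a : List Int) (n : Int) : Decidable (Pre_count a n) := by unfold Pre_count; infer_instance
def pvWitness_count : List Int × Int := ([2, 1, 3, 3, 5], 5)

def Spec_count (a : List Int) (n : Int) (out : Int) : Prop := out = count_alt a n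
instance (a : List Int) (n : Int) (out : Int) : Decidable (Spec_count a n out) := by unfold Spec_count; infer_instance

-- ===== CLAIM (what is proved, stated in full; the proofs are below) =====
def Claim_equal_count : Prop := ∀ (a : List Int) (n : Int), Dom_count a n → Pre_count a n → Spec_count a n (count a n)

-- ===== LEMMAS AND PROOFS =====

-- Bool test: index k is a pivot of a[0..m-1]
def pivB (a : List Int) (m : Nat) (k : Nat) : Bool :=
  decide (∀ j < m, k < j → a.getD k 0 ≤ a.getD j 0) && decide (∀ j < k, a.getD j 0 ≤ a.getD k 0)

-- values of the pivot indices below i, in index order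
def pvList (a : List Int) (m i : Nat) : List Int :=
  ((List.range i).filter (pivB a m)).map (fun k => a.getD k 0)

lemma pvList_succ (a : List Int) (m i : Nat) :
    pvList a m (i + 1) = pvList a m i ++ (if pivB a m i then [a.getD i 0] else []) := by
  unfold pvList
  rw [List.range_succ, List.filter_append, List.map_append]
  by_cases h : pivB a m i = true <;> simp [h]

lemma pivB_iff (a : List Int) (m k : Nat) :
    pivB a m k = true ↔
      ((∀ j < m, k < j → a.getD k 0 ≤ a.getD j 0) ∧ (∀ j < k, a.getD j 0 ≤ a.getD k 0)) := by
  simp [pivB]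

lemma dropWhile_head_false {α : Type} (p : α → Bool) (l : List α) (x : α) (xs : List α)
    (h : l.dropWhile p = x :: xs) : p x = false := by
  induction l with
  | nil => simp at h
  | cons y ys ih =>
    by_cases hy : p y = true
    · rw [List.dropWhile_cons_of_pos hy] at h; exact ih h
    · rw [List.dropWhile_cons_of_neg hy] at h
      cases h; simpa using hy

lemma mem_of_not_mem_dropWhile {α : Type} (p : α → Bool) (l : List α) (x : α)
    (hx : x ∈ l) (hnd : x ∉ l.dropWhile p) : p x = true := by
  have := List.takeWhile_append_dropWhile (p := p) (l := l)
  rw [← this] at hx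
  rcases List.mem_append.1 hx with h | h
  · exact List.mem_takeWhile_imp h
  · exact absurd h hnd

lemma ofList_append_singleton (l : List Int) (x : Int) :
    PySem.Set.ofList (l ++ [x]) = PySem.Set.add (PySem.Set.ofList l) x := by
  rw [PySem.Set.ofList_eq_foldl, PySem.Set.ofList_eq_foldl, List.foldl_append]
  rfl

lemma set_add_of_mem (s : PySem.Set Int) (x : Int) (h : x ∈ s) : PySem.Set.add s x = s := by
  simp [PySem.Set.add, PySem.Set.contains, h]

lemma set_add_of_not_mem (s : PySem.Set Int) (x : Int) (h : x ∉ s) :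
    PySem.Set.add s x = s ++ [x] := by
  simp [PySem.Set.add, PySem.Set.contains, h]

-- ---------- A, loop 1 (suffix stack, array b) ----------

def InvA1 (a : List Int) (m i : Nat) (s : List Int × List Int) : Prop :=
  s.2.length = m ∧
  (∀ t ∈ s.1, ∃ tn : Nat, t = (tn : Int) ∧ i ≤ tn ∧ tn < m) ∧
  (∀ j : Nat, i ≤ j → j < m → ∃ t ∈ s.1, a.getD t.toNat 0 ≤ a.getD j 0) ∧
  (∀ k : Nat, i ≤ k → k < m → (s.2.getD k 0 = -1 ↔ ∀ j < m, k < j → a.getD k 0 ≤ a.getD j 0))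

lemma stepA1_inv (a : List Int) (m i : Nat) (s : List Int × List Int)
    (him : i < m) (h : InvA1 a m (i + 1) s) : InvA1 a m i (stepA1 a s (i : Int)) := by
  obtain ⟨hlen, hstk, hcov, hent⟩ := h
  obtain ⟨L, hL⟩ : ∃ L, s.1.dropWhile
      (fun t => decide (PySem.List.pyGetD a (i : Int) 0 ≤ PySem.List.pyGetD a t 0)) = L :=
    ⟨_, rfl⟩
  have hstep : stepA1 a s (i : Int) =
      ((i : Int) :: L,
       PySem.List.pySetD s.2 (i : Int) (L.headD (-1))) := by
    unfold stepA1; rw [hL]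
  rw [hstep]
  have hpiff : ∀ (tn : Nat),
      (decide (PySem.List.pyGetD a (i : Int) 0 ≤ PySem.List.pyGetD a (tn : Int) 0)
        = true ↔ a.getD i 0 ≤ a.getD tn 0) := by
    intro tn; simp [PySem.List.pyGetD_natCast]
  have hsub : ∀ t ∈ L, t ∈ s.1 := by
    rw [← hL]; exact fun t ht => (List.dropWhile_sublist _).subset ht
  refine ⟨?_, ?_, ?_, ?_⟩
  · simpa [PySem.List.length_pySetD] using hlen
  · intro t ht
    rcases List.mem_cons.1 ht with rfl | ht'
    · exact ⟨i, rfl, le_refl _, him⟩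
    · rcases hstk t (hsub t ht') with ⟨tn, rfl, h1, h2⟩
      exact ⟨tn, rfl, by omega, h2⟩
  · intro j hij hjm
    rcases Nat.eq_or_lt_of_le hij with heq | hij'
    · exact ⟨(i : Int), List.mem_cons_self, by rw [← heq]; simp⟩
    · rcases hcov j hij' hjm with ⟨t, ht, hle⟩
      by_cases htd : t ∈ L
      · exact ⟨t, List.mem_cons_of_mem _ htd, hle⟩
      · rcases hstk t ht with ⟨tn, rfl, h1, h2⟩
        have hpt := mem_of_not_mem_dropWhile _ s.1 _ ht (by rw [hL]; exact htd)
        refine ⟨(i : Int), List.mem_cons_self, ?_⟩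
        have hix := (hpiff tn).1 hpt
        simp only [Int.toNat_natCast] at hle ⊢
        exact le_trans hix hle
  · intro k hik hkm
    have hgd : ∀ v : Int, (PySem.List.pySetD s.2 (i : Int) v).getD k 0 =
        if k = i then v else s.2.getD k 0 := by
      intro v
      rw [← PySem.List.pyGetD_natCast, PySem.List.pyGetD_pySetD_natCast _ _ _ _ _ (by omega),
        PySem.List.pyGetD_natCast]
    rcases Nat.eq_or_lt_of_le hik with heq | hik'
    · subst heq
      cases hd : L with
      | nil =>
        rw [hd] at hL
        have hall : ∀ t ∈ s.1, decide (PySem.List.pyGetD a (i : Int) 0 ≤ PySem.List.pyGetD a t 0)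
            = true := List.dropWhile_eq_nil_iff.1 hL
        simp only [hgd, eq_self_iff_true, if_true, List.headD_nil, List.headD_cons]
        constructor
        · intro _ j hjm hkj
          rcases hcov j (by omega) hjm with ⟨t, ht, hle⟩
          rcases hstk t ht with ⟨tn, rfl, _, _⟩
          have hix := (hpiff tn).1 (hall _ ht)
          simp only [Int.toNat_natCast] at hle
          exact le_trans hix hle
        · intro _; trivial
      | cons t rest =>
        rw [hd] at hL
        have htmem : t ∈ s.1 := hsub t (by rw [hd]; exact List.mem_cons_self)
        rcases hstk t htmem with ⟨tn, ht, h1, h2⟩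
        have hpf := dropWhile_head_false _ s.1 _ _ hL
        subst ht
        have hlt : a.getD tn 0 < a.getD i 0 := by
          by_contra hcon
          rw [(hpiff tn).2 (by omega)] at hpf
          cases hpf
        simp only [hgd, eq_self_iff_true, if_true, List.headD_nil, List.headD_cons]
        constructor
        · intro habs
          exfalso
          omega
        · intro hall
          exact absurd (hall tn h2 (by omega)) (not_le.2 hlt)
    · simp only [hgd, if_neg (by omega : ¬ k = i)]
      exact hent k (by omega) hkm

lemma loopA1 (a : List Int) (m : Nat) :
    ∀ i, i ≤ m → ∀ s, InvA1 a m i s →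
      InvA1 a m 0 ((PySem.List.pyRange ((i : Int) - 1) (-1) (-1)).foldl (stepA1 a) s) := by
  intro i
  induction i with
  | zero =>
    intro _ s hs
    rw [show ((0 : Nat) : Int) - 1 = -1 by norm_num, PySem.List.pyRange_neg_one_eq_nil (le_refl _)]
    exact hs
  | succ i ih =>
    intro hi s hs
    have h1 : ((i + 1 : Nat) : Int) - 1 = (i : Int) := by push_cast; ring
    rw [h1, PySem.List.pyRange_neg_one_cons (by omega), List.foldl_cons]
    exact ih (by omega) _ (stepA1_inv a m i s (by omega) hs)

-- ---------- A, loop 2 (prefix stack, array c) ----------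

def InvA2 (a : List Int) (m i : Nat) (s : List Int × List Int) : Prop :=
  s.2.length = m ∧
  (∀ t ∈ s.1, ∃ tn : Nat, t = (tn : Int) ∧ tn < i) ∧
  (∀ j : Nat, j < i → ∃ t ∈ s.1, a.getD j 0 ≤ a.getD t.toNat 0) ∧
  (∀ k : Nat, k < i → (s.2.getD k 0 = -1 ↔ ∀ j < k, a.getD j 0 ≤ a.getD k 0))

lemma stepA2_inv (a : List Int) (m i : Nat) (s : List Int × List Int)
    (him : i < m) (h : InvA2 a m i s) : InvA2 a m (i + 1) (stepA2 a s (i : Int)) := by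
  obtain ⟨hlen, hstk, hcov, hent⟩ := h
  obtain ⟨L, hL⟩ : ∃ L, s.1.dropWhile
      (fun t => decide (PySem.List.pyGetD a t 0 ≤ PySem.List.pyGetD a (i : Int) 0)) = L :=
    ⟨_, rfl⟩
  have hstep : stepA2 a s (i : Int) =
      ((i : Int) :: L,
       PySem.List.pySetD s.2 (i : Int) (L.headD (-1))) := by
    unfold stepA2; rw [hL]
  rw [hstep]
  have hpiff : ∀ (tn : Nat),
      (decide (PySem.List.pyGetD a (tn : Int) 0 ≤ PySem.List.pyGetD a (i : Int) 0)
        = true ↔ a.getD tn 0 ≤ a.getD i 0) := by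
    intro tn; simp [PySem.List.pyGetD_natCast]
  have hsub : ∀ t ∈ L, t ∈ s.1 := by
    rw [← hL]; exact fun t ht => (List.dropWhile_sublist _).subset ht
  refine ⟨?_, ?_, ?_, ?_⟩
  · simpa [PySem.List.length_pySetD] using hlen
  · intro t ht
    rcases List.mem_cons.1 ht with rfl | ht'
    · exact ⟨i, rfl, by omega⟩
    · rcases hstk t (hsub t ht') with ⟨tn, rfl, h1⟩
      exact ⟨tn, rfl, by omega⟩
  · intro j hj
    by_cases hji : j = i
    · subst hji
      exact ⟨(j : Int), List.mem_cons_self, by simp⟩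
    · rcases hcov j (by omega) with ⟨t, ht, hle⟩
      by_cases htd : t ∈ L
      · exact ⟨t, List.mem_cons_of_mem _ htd, hle⟩
      · rcases hstk t ht with ⟨tn, rfl, h1⟩
        have hpt := mem_of_not_mem_dropWhile _ s.1 _ ht (by rw [hL]; exact htd)
        refine ⟨(i : Int), List.mem_cons_self, ?_⟩
        have hix := (hpiff tn).1 hpt
        simp only [Int.toNat_natCast] at hle ⊢
        exact le_trans hle hix
  · intro k hk
    have hgd : ∀ v : Int, (PySem.List.pySetD s.2 (i : Int) v).getD k 0 =
        if k = i then v else s.2.getD k 0 := by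
      intro v
      rw [← PySem.List.pyGetD_natCast, PySem.List.pyGetD_pySetD_natCast _ _ _ _ _ (by omega),
        PySem.List.pyGetD_natCast]
    by_cases hki : k = i
    · subst hki
      cases hd : L with
      | nil =>
        rw [hd] at hL
        have hall : ∀ t ∈ s.1, decide (PySem.List.pyGetD a t 0 ≤ PySem.List.pyGetD a (k : Int) 0)
            = true := List.dropWhile_eq_nil_iff.1 hL
        simp only [hgd, eq_self_iff_true, if_true, List.headD_nil, List.headD_cons]
        constructor
        · intro _ j hjk
          rcases hcov j (by omega) with ⟨t, ht, hle⟩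
          rcases hstk t ht with ⟨tn, rfl, _⟩
          have hix := (hpiff tn).1 (hall _ ht)
          simp only [Int.toNat_natCast] at hle
          exact le_trans hle hix
        · intro _; trivial
      | cons t rest =>
        rw [hd] at hL
        have htmem : t ∈ s.1 := hsub t (by rw [hd]; exact List.mem_cons_self)
        rcases hstk t htmem with ⟨tn, ht, h1⟩
        have hpf := dropWhile_head_false _ s.1 _ _ hL
        subst ht
        have hlt : a.getD k 0 < a.getD tn 0 := by
          by_contra hcon
          rw [(hpiff tn).2 (by omega)] at hpf
          cases hpf
        simp only [hgd, eq_self_iff_true, if_true, List.headD_nil, List.headD_cons]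
        constructor
        · intro habs
          exfalso
          omega
        · intro hall
          exact absurd (hall tn h1) (not_le.2 hlt)
    · simp only [hgd, if_neg hki]
      exact hent k (by omega)

lemma loopA2 (a : List Int) (m : Nat) :
    ∀ d i, i + d = m → ∀ s, InvA2 a m i s →
      InvA2 a m m ((PySem.List.pyRange (i : Int) (m : Int) 1).foldl (stepA2 a) s) := by
  intro d
  induction d with
  | zero =>
    intro i hi s hs
    rw [PySem.List.pyRange_one_eq_nil (by omega)]
    rw [show i = m by omega] at hs
    exact hs
  | succ d ih =>
    intro i hi s hs
    rw [PySem.List.pyRange_one_cons (by omega : (i : Int) < (m : Int)), List.foldl_cons]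
    rw [show (i : Int) + 1 = ((i + 1 : Nat) : Int) by push_cast; ring]
    exact ih (i + 1) (by omega) _ (stepA2_inv a m i s (by omega) hs)

-- ---------- B, loop 1 (suffix minimum, array ok) ----------

def InvB1 (a : List Int) (m i : Nat) (s : List Bool × Option Int) : Prop :=
  s.1.length = m ∧
  (i = m → s.2 = none) ∧
  (i < m → ∃ r, s.2 = some r ∧ (∀ j : Nat, i ≤ j → j < m → r ≤ a.getD j 0) ∧
      ∃ j : Nat, i ≤ j ∧ j < m ∧ r = a.getD j 0) ∧
  (∀ k : Nat, i ≤ k → k < m →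
      (s.1.getD k false = true ↔ ∀ j < m, k < j → a.getD k 0 ≤ a.getD j 0))

lemma stepB1_inv (a : List Int) (m i : Nat) (s : List Bool × Option Int)
    (him : i < m) (h : InvB1 a m (i + 1) s) : InvB1 a m i (stepB1 a s (i : Int)) := by
  obtain ⟨hlen, hnone, hsome, hent⟩ := h
  have hgd : ∀ (v : Bool) (k : Nat),
      (PySem.List.pySetD s.1 (i : Int) v).getD k false =
      if k = i then v else s.1.getD k false := by
    intro v k
    rw [← PySem.List.pyGetD_natCast, PySem.List.pyGetD_pySetD_natCast _ _ _ _ _ (by omega),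
      PySem.List.pyGetD_natCast]
  cases hs2 : s.2 with
  | none =>
    have hm1 : i + 1 = m := by
      by_contra hc
      rcases hsome (by omega) with ⟨r, hr, _⟩
      rw [hs2] at hr; cases hr
    have hstep : stepB1 a s (i : Int) =
        (PySem.List.pySetD s.1 (i : Int) true, some (PySem.List.pyGetD a (i : Int) 0)) := by
      unfold stepB1; rw [hs2]
    rw [hstep]
    refine ⟨by simpa [PySem.List.length_pySetD] using hlen, by omega, ?_, ?_⟩
    · intro _
      refine ⟨PySem.List.pyGetD a (i : Int) 0, rfl, ?_, i, le_refl _, him, by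
        simp [PySem.List.pyGetD_natCast]⟩
      intro j h1 h2
      have : j = i := by omega
      subst this
      simp [PySem.List.pyGetD_natCast]
    · intro k hik hkm
      rw [hgd]
      by_cases hki : k = i
      · rw [if_pos hki]
        subst hki
        constructor
        · intro _ j hjm hkj; omega
        · intro _; trivial
      · omega
  | some r =>
    have hm1 : i + 1 < m := by
      by_contra hc
      have := hnone (by omega)
      rw [hs2] at this; cases this
    rcases hsome hm1 with ⟨r', hr', hub, j0, hj0a, hj0b, hj0c⟩
    rw [hs2] at hr'
    injection hr' with hr'
    subst hr'
    have hstep : stepB1 a s (i : Int) =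
        (PySem.List.pySetD s.1 (i : Int) (decide (PySem.List.pyGetD a (i : Int) 0 ≤ r)),
         some (min r (PySem.List.pyGetD a (i : Int) 0))) := by
      unfold stepB1; rw [hs2]
    rw [hstep]
    simp only [PySem.List.pyGetD_natCast] at *
    refine ⟨by simpa [PySem.List.length_pySetD] using hlen, by omega, ?_, ?_⟩
    · intro _
      refine ⟨min r (a.getD i 0), rfl, ?_, ?_⟩
      · intro j h1 h2
        rcases Nat.eq_or_lt_of_le h1 with heq | hij'
        · rw [← heq]; exact min_le_right _ _
        · exact le_trans (min_le_left _ _) (hub j (by omega) h2)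
      · rcases le_total r (a.getD i 0) with hle | hle
        · exact ⟨j0, by omega, hj0b, by rw [min_eq_left hle]; exact hj0c⟩
        · exact ⟨i, le_refl _, him, by rw [min_eq_right hle]⟩
    · intro k hik hkm
      rw [hgd]
      by_cases hki : k = i
      · rw [if_pos hki]
        subst hki
        simp only [decide_eq_true_eq]
        constructor
        · intro hxr j hjm hkj
          exact le_trans hxr (hub j (by omega) hjm)
        · intro hall
          rw [hj0c]
          exact hall j0 hj0b (by omega)
      · rw [if_neg hki]
        exact hent k (by omega) hkm

lemma loopB1 (a : List Int) (m : Nat) :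
    ∀ i, i ≤ m → ∀ s, InvB1 a m i s →
      InvB1 a m 0 ((PySem.List.pyRange ((i : Int) - 1) (-1) (-1)).foldl (stepB1 a) s) := by
  intro i
  induction i with
  | zero =>
    intro _ s hs
    rw [show ((0 : Nat) : Int) - 1 = -1 by norm_num, PySem.List.pyRange_neg_one_eq_nil (le_refl _)]
    exact hs
  | succ i ih =>
    intro hi s hs
    have h1 : ((i + 1 : Nat) : Int) - 1 = (i : Int) := by push_cast; ring
    rw [h1, PySem.List.pyRange_neg_one_cons (by omega), List.foldl_cons]
    exact ih (by omega) _ (stepB1_inv a m i s (by omega) hs)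

-- ---------- third loops: A's dict count vs B's set, in lockstep with pvList ----------

def InvA3 (a : List Int) (m i : Nat) (s : Int × PySem.Dict Int Int) : Prop :=
  s.1 = ((PySem.Set.ofList (pvList a m i)).length : Int) ∧
  s.2.keys = PySem.Set.ofList (pvList a m i)

lemma stepA3_inv (a b c : List Int) (m i : Nat) (s : Int × PySem.Dict Int Int)
    (hb : ∀ k < m, (b.getD k 0 = -1 ↔ ∀ j < m, k < j → a.getD k 0 ≤ a.getD j 0))
    (hc : ∀ k < m, (c.getD k 0 = -1 ↔ ∀ j < k, a.getD j 0 ≤ a.getD k 0))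
    (him : i < m) (h : InvA3 a m i s) : InvA3 a m (i + 1) (stepA3 a b c s (i : Int)) := by
  obtain ⟨hcnt, hkeys⟩ := h
  have hstep : stepA3 a b c s (i : Int) =
      if ((b.getD i 0 == -1) && (c.getD i 0 == -1) && !(s.2.contains (a.getD i 0))) = true
      then (s.1 + 1, s.2.insert (a.getD i 0) 1)
      else s := by
    unfold stepA3
    simp only [PySem.List.pyGetD_natCast]
  rw [hstep]
  by_cases hpiv : pivB a m i = true
  · have hpv : pvList a m (i + 1) = pvList a m i ++ [a.getD i 0] := by
      rw [pvList_succ, hpiv]; simp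
    have hsp := (pivB_iff a m i).1 hpiv
    have hb1 : (b.getD i 0 == -1) = true := by rw [beq_iff_eq]; exact (hb i him).2 hsp.1
    have hc1 : (c.getD i 0 == -1) = true := by rw [beq_iff_eq]; exact (hc i him).2 hsp.2
    by_cases hmem : a.getD i 0 ∈ PySem.Set.ofList (pvList a m i)
    · have hcont : s.2.contains (a.getD i 0) = true := by
        rw [PySem.Dict.contains_iff_mem_keys, hkeys]; exact hmem
      rw [if_neg (by rw [hb1, hc1, hcont]; simp)]
      unfold InvA3
      rw [hpv, ofList_append_singleton, set_add_of_mem _ _ hmem]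
      exact ⟨hcnt, hkeys⟩
    · have hcont : s.2.contains (a.getD i 0) = false := by
        rw [Bool.eq_false_iff]
        intro hcon
        exact hmem (by rw [← hkeys]; exact (PySem.Dict.contains_iff_mem_keys _ _).1 hcon)
      rw [if_pos (by rw [hb1, hc1, hcont]; rfl)]
      unfold InvA3
      rw [hpv, ofList_append_singleton, set_add_of_not_mem _ _ hmem]
      constructor
      · show s.1 + 1 = ((PySem.Set.ofList (pvList a m i) ++ [a.getD i 0]).length : Int)
        rw [hcnt, List.length_append, List.length_singleton]
        push_cast
        ring
      · show (s.2.insert (a.getD i 0) 1).keys = PySem.Set.ofList (pvList a m i) ++ [a.getD i 0]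
        rw [PySem.Dict.keys_insert_of_not_contains _ _ hcont, hkeys]
  · have hpv : pvList a m (i + 1) = pvList a m i := by
      rw [pvList_succ, Bool.eq_false_iff.2 hpiv]; simp
    have hfail : ¬ ((b.getD i 0 == -1) && (c.getD i 0 == -1) && !(s.2.contains (a.getD i 0)))
        = true := by
      intro hcon
      simp only [Bool.and_eq_true, beq_iff_eq] at hcon
      exact hpiv ((pivB_iff a m i).2 ⟨(hb i him).1 hcon.1.1, (hc i him).1 hcon.1.2⟩)
    rw [if_neg hfail]
    unfold InvA3
    rw [hpv]
    exact ⟨hcnt, hkeys⟩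

lemma loopA3 (a b c : List Int) (m : Nat)
    (hb : ∀ k < m, (b.getD k 0 = -1 ↔ ∀ j < m, k < j → a.getD k 0 ≤ a.getD j 0))
    (hc : ∀ k < m, (c.getD k 0 = -1 ↔ ∀ j < k, a.getD j 0 ≤ a.getD k 0)) :
    ∀ d i, i + d = m → ∀ s, InvA3 a m i s →
      InvA3 a m m ((PySem.List.pyRange (i : Int) (m : Int) 1).foldl (stepA3 a b c) s) := by
  intro d
  induction d with
  | zero =>
    intro i hi s hs
    rw [PySem.List.pyRange_one_eq_nil (by omega)]
    rw [show i = m by omega] at hs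
    exact hs
  | succ d ih =>
    intro i hi s hs
    rw [PySem.List.pyRange_one_cons (by omega : (i : Int) < (m : Int)), List.foldl_cons]
    rw [show (i : Int) + 1 = ((i + 1 : Nat) : Int) by push_cast; ring]
    exact ih (i + 1) (by omega) _ (stepA3_inv a b c m i s hb hc (by omega) hs)

def InvB2 (a : List Int) (m i : Nat) (s : PySem.Set Int × Option Int) : Prop :=
  s.1 = PySem.Set.ofList (pvList a m i) ∧
  (i = 0 → s.2 = none) ∧
  (0 < i → ∃ r, s.2 = some r ∧ (∀ j : Nat, j < i → a.getD j 0 ≤ r) ∧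
      ∃ j : Nat, j < i ∧ r = a.getD j 0)

lemma stepB2_inv (a : List Int) (ok : List Bool) (m i : Nat) (s : PySem.Set Int × Option Int)
    (hok : ∀ k < m, (ok.getD k false = true ↔ ∀ j < m, k < j → a.getD k 0 ≤ a.getD j 0))
    (him : i < m) (h : InvB2 a m i s) : InvB2 a m (i + 1) (stepB2 a ok s (i : Int)) := by
  obtain ⟨hpiv, hnone, hsome⟩ := h
  cases hs2 : s.2 with
  | none =>
    have hi0 : i = 0 := by
      by_contra hc
      rcases hsome (by omega) with ⟨r, hr, _⟩
      rw [hs2] at hr; cases hr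
    subst hi0
    have hstep : stepB2 a ok s ((0 : Nat) : Int) =
        (if (ok.getD 0 false && true) = true then PySem.Set.add s.1 (a.getD 0 0) else s.1,
         some (a.getD 0 0)) := by
      unfold stepB2; rw [hs2]
      simp only [PySem.List.pyGetD_natCast]
    rw [hstep]
    have hpass : (ok.getD 0 false && true) = pivB a m 0 := by
      rw [Bool.and_true]
      by_cases hs : ok.getD 0 false = true
      · have hpq : pivB a m 0 = true :=
          (pivB_iff a m 0).2 ⟨(hok 0 him).1 hs, by omega⟩
        rw [hs, hpq]
      · have hpq : pivB a m 0 = false := by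
          rw [Bool.eq_false_iff]
          intro hcon
          exact hs ((hok 0 him).2 ((pivB_iff a m 0).1 hcon).1)
        rw [Bool.eq_false_iff.2 hs, hpq]
    refine ⟨?_, by omega, ?_⟩
    · rw [hpass]
      by_cases hp : pivB a m 0 = true
      · rw [if_pos hp, hpiv, ← ofList_append_singleton, pvList_succ]
        simp [hp]
      · rw [if_neg hp, hpiv, pvList_succ]
        simp [Bool.eq_false_iff.2 hp]
    · intro _
      refine ⟨a.getD 0 0, rfl, ?_, 0, by omega, rfl⟩
      intro j hj
      interval_cases j
      exact le_refl _
  | some r =>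
    have hi0 : 0 < i := by
      by_contra hc
      have := hnone (by omega)
      rw [hs2] at this; cases this
    rcases hsome hi0 with ⟨r', hr', hub, j0, hj0, hj0c⟩
    rw [hs2] at hr'
    injection hr' with hr'
    subst hr'
    have hstep : stepB2 a ok s (i : Int) =
        (if (ok.getD i false && decide (r ≤ a.getD i 0)) = true
         then PySem.Set.add s.1 (a.getD i 0) else s.1,
         some (max r (a.getD i 0))) := by
      unfold stepB2; rw [hs2]
      simp only [PySem.List.pyGetD_natCast]
    rw [hstep]
    have hpass : (ok.getD i false && decide (r ≤ a.getD i 0)) = pivB a m i := by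
      by_cases hs : ok.getD i false = true
      · by_cases hle : r ≤ a.getD i 0
        · have hpq : pivB a m i = true :=
            (pivB_iff a m i).2 ⟨(hok i him).1 hs, fun j hj => le_trans (hub j hj) hle⟩
          rw [hs, decide_eq_true hle, hpq]
          rfl
        · have hpq : pivB a m i = false := by
            rw [Bool.eq_false_iff]
            intro hcon
            exact hle (by rw [hj0c]; exact ((pivB_iff a m i).1 hcon).2 j0 hj0)
          rw [hs, decide_eq_false hle, hpq, Bool.true_and]
      · have hpq : pivB a m i = false := by
          rw [Bool.eq_false_iff]
          intro hcon
          exact hs ((hok i him).2 ((pivB_iff a m i).1 hcon).1)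
        rw [Bool.eq_false_iff.2 hs, hpq, Bool.false_and]
    refine ⟨?_, by omega, ?_⟩
    · rw [hpass]
      by_cases hp : pivB a m i = true
      · rw [if_pos hp, hpiv, ← ofList_append_singleton, pvList_succ]
        simp [hp]
      · rw [if_neg hp, hpiv, pvList_succ]
        simp [Bool.eq_false_iff.2 hp]
    · intro _
      refine ⟨max r (a.getD i 0), rfl, ?_, ?_⟩
      · intro j hj
        by_cases hji : j = i
        · subst hji; exact le_max_right _ _
        · exact le_trans (hub j (by omega)) (le_max_left _ _)
      · rcases le_total r (a.getD i 0) with hle | hle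
        · exact ⟨i, by omega, by rw [max_eq_right hle]⟩
        · exact ⟨j0, by omega, by rw [max_eq_left hle]; exact hj0c⟩

lemma loopB2 (a : List Int) (ok : List Bool) (m : Nat)
    (hok : ∀ k < m, (ok.getD k false = true ↔ ∀ j < m, k < j → a.getD k 0 ≤ a.getD j 0)) :
    ∀ d i, i + d = m → ∀ s, InvB2 a m i s →
      InvB2 a m m ((PySem.List.pyRange (i : Int) (m : Int) 1).foldl (stepB2 a ok) s) := by
  intro d
  induction d with
  | zero =>
    intro i hi s hs
    rw [PySem.List.pyRange_one_eq_nil (by omega)]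
    rw [show i = m by omega] at hs
    exact hs
  | succ d ih =>
    intro i hi s hs
    rw [PySem.List.pyRange_one_cons (by omega : (i : Int) < (m : Int)), List.foldl_cons]
    rw [show (i : Int) + 1 = ((i + 1 : Nat) : Int) by push_cast; ring]
    exact ih (i + 1) (by omega) _ (stepB2_inv a ok m i s hok (by omega) hs)

-- ---------- assembly ----------

lemma count_eq_of_nat (a : List Int) (m : Nat) :
    count a (m : Int) = count_alt a (m : Int) := by
  have hA1 : InvA1 a m 0 ((PySem.List.pyRange ((m : Int) - 1) (-1) (-1)).foldl (stepA1 a)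
      ([], List.replicate m 0)) :=
    loopA1 a m m (le_refl m) _ ⟨by simp, by simp, by omega, by omega⟩
  have hB1 : InvB1 a m 0 ((PySem.List.pyRange ((m : Int) - 1) (-1) (-1)).foldl (stepB1 a)
      (List.replicate m false, none)) :=
    loopB1 a m m (le_refl m) _ ⟨by simp, fun _ => rfl, by omega, by omega⟩
  have hA2 : InvA2 a m m ((PySem.List.pyRange 0 (m : Int) 1).foldl (stepA2 a)
      ([], List.replicate m 0)) := by
    have := loopA2 a m m 0 (by omega) ([], List.replicate m 0)
      ⟨by simp, by simp, by omega, by omega⟩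
    simpa using this
  obtain ⟨-, -, -, hb⟩ := hA1
  obtain ⟨-, -, -, hok⟩ := hB1
  obtain ⟨-, -, -, hc⟩ := hA2
  have hA3 : InvA3 a m m ((PySem.List.pyRange 0 (m : Int) 1).foldl
      (stepA3 a ((PySem.List.pyRange ((m : Int) - 1) (-1) (-1)).foldl (stepA1 a)
        ([], List.replicate m 0)).2
        ((PySem.List.pyRange 0 (m : Int) 1).foldl (stepA2 a) ([], List.replicate m 0)).2)
      (0, PySem.Dict.empty)) := by
    have := loopA3 a _ _ m (fun k hk => hb k (by omega) hk) (fun k hk => hc k hk) m 0 (by omega)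
      (0, PySem.Dict.empty)
      ⟨by simp [pvList], by simp [pvList, PySem.Dict.empty, PySem.Dict.keys]⟩
    simpa using this
  have hB2 : InvB2 a m m ((PySem.List.pyRange 0 (m : Int) 1).foldl
      (stepB2 a ((PySem.List.pyRange ((m : Int) - 1) (-1) (-1)).foldl (stepB1 a)
        (List.replicate m false, none)).1)
      (PySem.Set.empty, none)) := by
    have := loopB2 a _ m (fun k hk => hok k (by omega) hk) m 0 (by omega)
      (PySem.Set.empty, none)
      ⟨by simp [pvList, PySem.Set.empty], fun _ => rfl, by omega⟩
    simpa using this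
  obtain ⟨hcnt, -⟩ := hA3
  obtain ⟨hset, -, -⟩ := hB2
  unfold count count_alt
  simp only [Int.toNat_natCast]
  rw [hcnt, hset]
  simp [PySem.Set.len]

-- ===== VERDICT (by name: the statement is the Claim_ definition above) =====
theorem count_spec : Claim_equal_count := by
  intro a n _ hpre
  unfold Spec_count
  by_cases hn : 0 ≤ n
  · have hmn : n = ((n.toNat : Nat) : Int) := by omega
    rw [hmn]
    exact count_eq_of_nat a n.toNat
  · have hn' : n < 0 := by omega
    unfold count count_alt
    rw [PySem.List.pyRange_neg_one_eq_nil (by omega), PySem.List.pyRange_one_eq_nil (by omega)]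
    simp [PySem.Set.len, PySem.Set.empty]
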